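-- pv_equiv track=rewrite | github.com/johnzastrow/mapsplat4 | style_converter.py | _compute_sprite_layout
-- ===== SOURCE A (Python) =====
-- def _compute_sprite_layout(sprite_sizes):
--     """Compute x/y offsets for a single-row sprite atlas.
--
--     :param sprite_sizes: dict mapping name -> (width, height) in pixels
--     :returns: (manifest_dict, total_width, total_height)
--               manifest_dict maps name -> {"x", "y", "width", "height", "pixelRatio"}
--     """
--     manifest = {}
--     x = 0
--     max_height = 0
--     for name, (w, h) in sprite_sizes.items():
--         manifest[name] = {
--             "x": x,
--             "y": 0,
--             "width": w,
--             "height": h,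
--             "pixelRatio": 1,
--         }
--         x += w
--         max_height = max(max_height, h)
--     return manifest, x, max_height
-- ===== SOURCE B (Python) =====
-- def _prefix_offsets(widths):
--     offsets = [0]
--     for w in widths:
--         offsets.append(offsets[-1] + w)
--     return offsets
--
--
-- def _compute_sprite_layout(sprite_sizes):
--     names = list(sprite_sizes)
--     widths = [w for w, _ in sprite_sizes.values()]
--     heights = [h for _, h in sprite_sizes.values()]
--     offsets = _prefix_offsets(widths)
--     manifest = {
--         name: {"x": off, "y": 0, "width": w, "height": h, "pixelRatio": 1}
--         for name, off, w, h in zip(names, offsets, widths, heights)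
--     }
--     return manifest, offsets[-1], max([0, *heights])
-- ===== Notes on version B (the rewrite author's own statement) =====
-- stated objective: alternative
-- what changed: A's single loop carrying a running x offset and running max is replaced by projection passes (names/widths/heights), an explicit exclusive prefix-sum of widths, a zip-built manifest, and total width/height read off as the last offset and max of heights.
import Mathlib
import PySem

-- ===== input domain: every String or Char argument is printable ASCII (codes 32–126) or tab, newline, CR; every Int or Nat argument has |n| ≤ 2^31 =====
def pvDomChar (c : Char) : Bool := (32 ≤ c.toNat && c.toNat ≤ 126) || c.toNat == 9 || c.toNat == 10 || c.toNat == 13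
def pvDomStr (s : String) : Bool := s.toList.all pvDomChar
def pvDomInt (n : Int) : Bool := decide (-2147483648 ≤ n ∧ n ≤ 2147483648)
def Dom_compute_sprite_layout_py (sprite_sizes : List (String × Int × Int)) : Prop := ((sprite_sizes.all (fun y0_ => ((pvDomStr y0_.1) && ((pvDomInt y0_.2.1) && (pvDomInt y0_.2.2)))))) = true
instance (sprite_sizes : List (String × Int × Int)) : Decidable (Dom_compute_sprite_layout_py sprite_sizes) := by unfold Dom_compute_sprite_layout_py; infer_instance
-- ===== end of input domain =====

-- B replaces A's single loop with a running x/max accumulator by three projection passes,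
-- an explicit exclusive prefix-sum of the widths, and a zip-built manifest (objective: alternative decomposition).

-- ===== PORT A =====
-- A's loop: insert the entry at the running x, advance x by w, fold the max height.
def pvALoop : List (String × Int × Int) → PySem.Dict String (List (String × Int)) → Int → Int →
    (List (String × List (String × Int))) × Int × Int
  | [], m, x, mh => (m.items, x, mh)
  | (n, w, h) :: rest, m, x, mh =>
      pvALoop rest
        (m.insert n [("x", x), ("y", 0), ("width", w), ("height", h), ("pixelRatio", 1)])
        (x + w) (max mh h)

def compute_sprite_layout_py (sprite_sizes : List (String × Int × Int)) :
    (List (String × List (String × Int))) × Int × Int :=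
  pvALoop sprite_sizes PySem.Dict.empty 0 0

-- ===== PORT B =====
-- Source B's _prefix_offsets: offsets = [0]; for w: offsets.append(offsets[-1] + w).
-- 'offsets[-1]' is ported as getLastD 0, exact here because the accumulator list is never empty.
def pvPrefixOffsets : List Int → List Int → List Int
  | [], out => out
  | w :: r, out => pvPrefixOffsets r (out ++ [out.getLastD 0 + w])

def compute_sprite_layout_py_alt (sprite_sizes : List (String × Int × Int)) :
    (List (String × List (String × Int))) × Int × Int :=
  let names := sprite_sizes.map (·.1)
  let widths := sprite_sizes.map (·.2.1)
  let heights := sprite_sizes.map (·.2.2)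
  let offsets := pvPrefixOffsets widths [0]
  -- dict comprehension over zip(names, offsets, widths, heights) (zip truncates to names)
  let manifest := (names.zip (offsets.zip (widths.zip heights))).foldl
      (fun m p =>
        m.insert p.1 [("x", p.2.1), ("y", 0), ("width", p.2.2.1), ("height", p.2.2.2), ("pixelRatio", 1)])
      PySem.Dict.empty
  -- 'offsets[-1]' ported as getLastD 0, exact: offsets is nonempty; max([0,*heights]) is builtin max
  (manifest.items, offsets.getLastD 0, PySem.List.maxD ((0 : Int) :: heights) id 0)

-- ===== PRECONDITION & SPEC =====
def Spec_compute_sprite_layout_py (sprite_sizes : List (String × Int × Int)) (out : (List (String × List (String × Int))) × Int × Int) : Prop := out = compute_sprite_layout_py_alt sprite_sizes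
instance (sprite_sizes : List (String × Int × Int)) (out : (List (String × List (String × Int))) × Int × Int) : Decidable (Spec_compute_sprite_layout_py sprite_sizes out) := by unfold Spec_compute_sprite_layout_py; infer_instance

-- ===== CLAIM (what is proved, stated in full; the proofs are below) =====
def Claim_equal_compute_sprite_layout_py : Prop := ∀ (sprite_sizes : List (String × Int × Int)), Dom_compute_sprite_layout_py sprite_sizes → Spec_compute_sprite_layout_py sprite_sizes (compute_sprite_layout_py sprite_sizes)

-- ===== LEMMAS AND PROOFS =====

-- exclusive running sums starting AFTER a
def pvScan (a : Int) : List Int → List Int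
  | [] => []
  | w :: r => (a + w) :: pvScan (a + w) r

theorem pvPrefixOffsets_spec (ws : List Int) : ∀ (pre : List Int) (a : Int),
    pvPrefixOffsets ws (pre ++ [a]) = pre ++ [a] ++ pvScan a ws := by
  induction ws with
  | nil => intro pre a; simp [pvPrefixOffsets, pvScan]
  | cons w r ih =>
      intro pre a
      have hlast : (pre ++ [a]).getLastD 0 = a := by
        simp
      show pvPrefixOffsets r ((pre ++ [a]) ++ [(pre ++ [a]).getLastD 0 + w]) = _
      rw [hlast, ih (pre ++ [a]) (a + w)]
      simp [pvScan]

theorem pvScan_getLastD (ws : List Int) : ∀ (a : Int),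
    (a :: pvScan a ws).getLastD 0 = a + ws.sum := by
  induction ws with
  | nil => intro a; simp [pvScan]
  | cons w r ih =>
      intro a
      show ((a + w) :: pvScan (a + w) r).getLastD 0 = _
      rw [ih (a + w)]
      simp [List.sum_cons]; ring

theorem pvMax_fold (f : Option Int → Int → Option Int)
    (hf : ∀ q x, f (some q) x = if q < x then some x else some q) (hs : List Int) :
    ∀ m : Int, List.foldl f (some m) hs = some (List.foldl max m hs) := by
  induction hs with
  | nil => intro m; rfl
  | cons h r ih =>
      intro m
      rw [List.foldl_cons, hf, List.foldl_cons]
      have hmax : (if m < h then some h else some m) = some (max m h) := by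
        split <;> congr 1 <;> omega
      rw [hmax, ih]

theorem pvMaxD_eq (hs : List Int) :
    PySem.List.maxD ((0 : Int) :: hs) id 0 = List.foldl max 0 hs := by
  simp only [PySem.List.maxD, PySem.List.max?, List.foldl_cons, id]
  rw [pvMax_fold _ (fun q x => rfl) hs 0]
  rfl

theorem pvMain (l : List (String × Int × Int)) :
    ∀ (m : PySem.Dict String (List (String × Int))) (x mh : Int),
    pvALoop l m x mh =
      (((l.map (·.1)).zip ((x :: pvScan x (l.map (·.2.1))).zip ((l.map (·.2.1)).zip (l.map (·.2.2))))).foldl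
          (fun m p =>
            m.insert p.1 [("x", p.2.1), ("y", 0), ("width", p.2.2.1), ("height", p.2.2.2), ("pixelRatio", 1)])
          m |>.items,
        x + (l.map (·.2.1)).sum,
        List.foldl max mh (l.map (·.2.2))) := by
  induction l with
  | nil => intro m x mh; simp [pvALoop, pvScan]
  | cons p r ih =>
      intro m x mh
      obtain ⟨n, w, h⟩ := p
      show pvALoop r _ (x + w) (max mh h) = _
      rw [ih]
      simp [pvScan]
      ring

-- ===== VERDICT (by name: the statement is the Claim_ definition above) =====
theorem compute_sprite_layout_py_spec : Claim_equal_compute_sprite_layout_py := by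
  intro ss _
  show compute_sprite_layout_py ss = compute_sprite_layout_py_alt ss
  have hoff : pvPrefixOffsets (ss.map (·.2.1)) [(0 : Int)] =
      (0 : Int) :: pvScan 0 (ss.map (·.2.1)) := by
    simpa using pvPrefixOffsets_spec (ss.map (·.2.1)) [] 0
  simp only [compute_sprite_layout_py, compute_sprite_layout_py_alt, hoff]
  rw [pvMain ss PySem.Dict.empty 0 0]
  refine Prod.ext rfl (Prod.ext ?_ ?_)
  · simpa using (pvScan_getLastD (ss.map (·.2.1)) 0).symm
  · exact (pvMaxD_eq (ss.map (·.2.2))).symm
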